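-- pv_equiv track=rewrite | github.com/molly-101/Algorithm | KAKAO2021/recommend_new_id.py | partFour
-- ===== SOURCE A (Python) =====
-- def partFour(new_id): # 마침표(.)가 처음이나 끝에 위치한다면 제거합니다.
--     if new_id == "":
--         return new_id
--     while new_id[0] == "." or new_id[len(new_id)-1] == "." and new_id != "":
--         if new_id[0] == ".":
--             new_id = new_id[1:]
--             if new_id == "":
--                 break
--         if new_id[len(new_id)-1] == ".":
--             new_id = new_id[:len(new_id)-1]
--     return new_id
-- ===== SOURCE B (Python) =====
-- def partFour(new_id):
--     # Find the non-dot region with two index scans, then slice once.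
--     n = len(new_id)
--     start = 0
--     while start < n and new_id[start] == '.':
--         start += 1
--     end = n
--     while end > start and new_id[end - 1] == '.':
--         end -= 1
--     return new_id[start:end]
-- ===== Notes on version B (the rewrite author's own statement) =====
-- stated objective: alternative
-- what changed: Replaces the while loop that repeatedly rebuilds the string by slicing one dot off an end per iteration (quadratic on dot-heavy ends) with two index scans that find the trim boundaries and a single final slice; Pre_ excludes only the even-length all-dot strings, on which A raises IndexError (B returns "" there).
import Mathlib
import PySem

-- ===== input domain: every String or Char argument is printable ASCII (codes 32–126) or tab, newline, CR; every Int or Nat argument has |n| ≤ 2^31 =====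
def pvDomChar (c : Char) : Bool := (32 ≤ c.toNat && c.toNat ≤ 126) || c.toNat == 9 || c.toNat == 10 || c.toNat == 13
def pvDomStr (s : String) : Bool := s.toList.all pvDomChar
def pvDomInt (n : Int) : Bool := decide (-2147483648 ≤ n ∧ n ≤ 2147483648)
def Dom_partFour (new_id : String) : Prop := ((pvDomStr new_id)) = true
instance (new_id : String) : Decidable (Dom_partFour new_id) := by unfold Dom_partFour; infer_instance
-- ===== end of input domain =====

-- B finds the trim boundaries with two index scans and slices once, instead of A's
-- loop that re-slices the string once per removed dot (objective: alternative).

-- ===== PORT A =====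
-- A's while loop; state = the current string as a list of chars.
-- The [] arm is unreachable from `partFour` on Pre_: Python raises IndexError
-- at the loop condition exactly when the string becomes empty there (even-length
-- all-dot inputs), and Pre_ excludes those.
def partFourLoopA : List Char → List Char
  | [] => []
  | s@(c :: _) =>
    if c == '.' || (s.getLast! == '.' && !s.isEmpty) then
      let s1 := if c == '.' then s.tail else s
      if s1.isEmpty then s1
      else
        let s2 := if s1.getLast! == '.' then s1.dropLast else s1
        partFourLoopA s2
    else s
termination_by s => s.length
decreasing_by
  rename_i hcond hne
  subst_vars
  split_ifs at * <;> simp_all [List.length_dropLast]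

def partFour (new_id : String) : String :=
  if new_id == "" then new_id
  else String.ofList (partFourLoopA new_id.toList)

-- ===== PORT B =====
-- while start < n and new_id[start] == '.': start += 1
def partFourBStart (s : List Char) (start : Nat) : Nat :=
  if h : start < s.length then
    if s[start] == '.' then partFourBStart s (start + 1) else start
  else start
termination_by s.length - start

-- while end > start and new_id[end-1] == '.': end -= 1
-- (s[e-1]! is exact: e - 1 is always in range when this index is evaluated)
def partFourBEnd (s : List Char) (start : Nat) (e : Nat) : Nat :=
  if start < e then
    if s[e - 1]! == '.' then partFourBEnd s start (e - 1) else e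
  else e
termination_by e
decreasing_by omega

def partFour_alt (new_id : String) : String :=
  let s := new_id.toList
  let start := partFourBStart s 0
  let e := partFourBEnd s start s.length
  -- new_id[start:e]; exact since 0 ≤ start ≤ e ≤ len here
  String.ofList ((s.drop start).take (e - start))

-- ===== PRECONDITION & SPEC =====
-- Pre_ excludes exactly the inputs where A raises IndexError: nonempty all-dot
-- strings of even length (the loop empties the string, then indexes it).
def Pre_partFour (new_id : String) : Prop :=
  ¬ (new_id.toList ≠ [] ∧ new_id.toList.all (· == '.') = true ∧ new_id.toList.length % 2 = 0)
instance (new_id : String) : Decidable (Pre_partFour new_id) := by unfold Pre_partFour; infer_instance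

def pvWitness_partFour : String := "a.b."

def Spec_partFour (new_id : String) (out : String) : Prop := out = partFour_alt new_id
instance (new_id : String) (out : String) : Decidable (Spec_partFour new_id out) := by unfold Spec_partFour; infer_instance

-- ===== CLAIM (what is proved, stated in full; the proofs are below) =====
def Claim_equal_partFour : Prop := ∀ (new_id : String), Dom_partFour new_id → Pre_partFour new_id → Spec_partFour new_id (partFour new_id)

-- ===== LEMMAS AND PROOFS =====

-- the canonical value both programs compute: leading dots dropped, then trailing dots dropped
def pvDot (c : Char) : Bool := c == '.'
def pvCanon (s : List Char) : List Char :=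
  ((s.dropWhile pvDot).reverse.dropWhile pvDot).reverse

theorem pvGetLast!_cons (c : Char) (t : List Char) :
    (c :: t).getLast! = (c :: t).getLast (by simp) := rfl

theorem pvDropWhile_append (p : Char → Bool) (t u : List Char)
    (h : t.dropWhile p ≠ []) : (t ++ u).dropWhile p = t.dropWhile p ++ u := by
  induction t with
  | nil => simp at h
  | cons c t ih =>
    by_cases hc : p c
    · simp only [List.dropWhile_cons, hc, if_true, List.cons_append]
      exact ih (by simpa [List.dropWhile_cons, hc] using h)
    · simp [List.dropWhile_cons, hc]

theorem pvCanon_cons_dot (t : List Char) : pvCanon ('.' :: t) = pvCanon t := by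
  simp [pvCanon, List.dropWhile_cons, pvDot]

theorem pvCanon_concat_dot (t : List Char) : pvCanon (t ++ ['.']) = pvCanon t := by
  by_cases h : t.dropWhile pvDot = []
  · have hall : ∀ x ∈ t, pvDot x := List.dropWhile_eq_nil_iff.mp h
    have h2 : (t ++ ['.']).dropWhile pvDot = [] := by
      refine List.dropWhile_eq_nil_iff.mpr ?_
      intro x hx
      rcases List.mem_append.mp hx with hx | hx
      · exact hall x hx
      · simp at hx; simp [hx, pvDot]
    simp [pvCanon, h2, h]
  · rw [pvCanon, pvDropWhile_append _ _ _ h]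
    simp [pvCanon, List.dropWhile_cons, pvDot]

theorem pvCanon_noop (c : Char) (t : List Char) (hc : c ≠ '.')
    (hl : (c :: t).getLast! ≠ '.') : pvCanon (c :: t) = c :: t := by
  have h1 : (c :: t).dropWhile pvDot = c :: t := by
    simp [List.dropWhile_cons, pvDot, hc]
  have hne : (c :: t) ≠ ([] : List Char) := by simp
  have hlast : pvDot ((c :: t).getLast hne) = false := by
    rw [pvGetLast!_cons] at hl
    simp [pvDot, hl]
  have hrep : (c :: t).dropLast ++ [(c :: t).getLast hne] = c :: t :=
    List.dropLast_append_getLast hne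
  have h2 : ((c :: t).dropLast ++ [(c :: t).getLast hne]).reverse
      = (c :: t).getLast hne :: (c :: t).dropLast.reverse := by simp
  rw [pvCanon, h1, ← hrep, h2, List.dropWhile_cons_of_neg (by simp [hlast]),
    List.reverse_cons, List.reverse_reverse, hrep]

theorem partFourLoopA_eq_canon (s : List Char) : partFourLoopA s = pvCanon s := by
  induction hn : s.length using Nat.strong_induction_on generalizing s with
  | _ n ih =>
  subst hn
  cases s with
  | nil => simp [partFourLoopA, pvCanon]
  | cons c t =>
    -- helper: pvCanon absorbs removal of a trailing dot
    have htrail : ∀ l : List Char, l ≠ [] → l.getLast! = '.' → pvCanon l.dropLast = pvCanon l := by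
      intro l hl hd
      obtain ⟨c', t', rfl⟩ := List.exists_cons_of_ne_nil hl
      rw [pvGetLast!_cons] at hd
      have hrep := List.dropLast_append_getLast (l := c' :: t') (by simp)
      calc pvCanon (c' :: t').dropLast
          = pvCanon ((c' :: t').dropLast ++ ['.']) := (pvCanon_concat_dot _).symm
        _ = pvCanon (c' :: t') := by rw [← hd, hrep]
    simp only [partFourLoopA]
    split_ifs with hA hB hC hD hC2 hD2 <;>
      simp only [List.tail_cons, List.isEmpty_iff] at *
    · -- c = '.', tail empty: s = ['.']
      have hc : c = '.' := by simpa using hB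
      subst hc; subst hC
      simp [pvCanon, List.dropWhile_cons, pvDot]
    · -- c = '.', t ≠ [], t ends in '.'
      have hc : c = '.' := by simpa using hB
      subst hc
      rw [ih t.dropLast.length (by simp [List.length_dropLast]) _ rfl]
      rw [htrail t hC (by simpa using hD), pvCanon_cons_dot]
    · -- c = '.', t ≠ [], t does not end in '.'
      have hc : c = '.' := by simpa using hB
      subst hc
      rw [ih t.length (by simp) _ rfl, pvCanon_cons_dot]
    · -- c ≠ '.', s1 = c :: t reported empty: impossible
      exact absurd hC2 (by simp)
    · -- c ≠ '.', last is '.': drop the last char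
      rw [ih (c :: t).dropLast.length (by simp [List.length_dropLast]) _ rfl]
      exact htrail (c :: t) (by simp) (by simpa using hD2)
    · -- c ≠ '.', cond true but last not '.': contradiction
      exfalso
      simp only [Bool.or_eq_true, beq_iff_eq, Bool.and_eq_true, Bool.not_eq_true',
        List.isEmpty_iff] at hA
      rcases hA with h | ⟨h, _⟩
      · exact hB (by simpa using h)
      · exact hD2 (by simpa using h)
    · -- cond false: nothing to trim
      simp only [Bool.or_eq_true, beq_iff_eq, Bool.and_eq_true, Bool.not_eq_true',
        List.isEmpty_iff, not_or, not_and] at hA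
      refine (pvCanon_noop c t hA.1 ?_).symm
      intro h
      have := hA.2 (by simpa using h)
      simp at this

theorem pvBStart_eq (s : List Char) (i : Nat) :
    partFourBStart s i = i + ((s.drop i).takeWhile pvDot).length := by
  induction i using partFourBStart.induct s with
  | case1 i h hdot ih =>
    rw [partFourBStart]
    rw [dif_pos h, if_pos hdot]
    rw [ih]
    rw [List.drop_eq_getElem_cons h]
    rw [List.takeWhile_cons_of_pos (by simpa [pvDot] using hdot)]
    simp; omega
  | case2 i h hdot =>
    rw [partFourBStart]
    rw [dif_pos h, if_neg hdot]
    rw [List.drop_eq_getElem_cons h]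
    rw [List.takeWhile_cons_of_neg (by simpa [pvDot] using hdot)]
    simp
  | case3 i h =>
    rw [partFourBStart]
    rw [dif_neg h]
    rw [List.drop_eq_nil_of_le (by omega)]
    simp

theorem pvBEnd_eq (s : List Char) (start : Nat) (e : Nat) (hse : start ≤ e) (hel : e ≤ s.length) :
    (s.drop start).take (partFourBEnd s start e - start)
      = (((s.drop start).take (e - start)).reverse.dropWhile pvDot).reverse := by
  induction e using Nat.strong_induction_on with
  | _ e ih =>
  rw [partFourBEnd]
  by_cases h1 : start < e
  · have he1 : e - 1 < s.length := by omega
    have hgetb : s[e-1]! = s[e-1]'he1 := getElem!_pos s (e-1) he1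
    have hsplit : (s.drop start).take (e - start)
        = (s.drop start).take (e - 1 - start) ++ [s[e-1]'he1] := by
      have hes : e - start = (e - 1 - start) + 1 := by omega
      rw [hes, List.take_add_one]
      congr 1
      rw [List.getElem?_drop]
      rw [show start + (e - 1 - start) = e - 1 by omega]
      rw [List.getElem?_eq_getElem he1]
      rfl
    rw [if_pos h1]
    by_cases hd : (s[e-1]! == '.') = true
    · rw [if_pos hd]
      rw [ih (e-1) (by omega) (by omega) (by omega)]
      rw [hsplit]
      have : pvDot (s[e-1]'he1) = true := by
        rw [← hgetb]; simpa [pvDot] using hd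
      simp [List.reverse_append, List.dropWhile_cons, this]
    · rw [if_neg hd]
      have hpd : pvDot (s[e-1]'he1) = false := by
        rw [← hgetb]; simpa [pvDot] using hd
      have h3 : (List.take (e-1-start) (List.drop start s) ++ [s[e-1]'he1]).reverse
          = s[e-1]'he1 :: (List.take (e-1-start) (List.drop start s)).reverse := by simp
      conv_rhs => rw [hsplit, h3]
      rw [List.dropWhile_cons_of_neg (by simp [hpd]), List.reverse_cons, List.reverse_reverse]
      exact hsplit
  · rw [if_neg h1]
    have : e = start := by omega
    subst this
    simp

theorem partFour_alt_eq_canon (new_id : String) :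
    partFour_alt new_id = String.ofList (pvCanon new_id.toList) := by
  show String.ofList
      (List.take (partFourBEnd new_id.toList (partFourBStart new_id.toList 0) new_id.toList.length
          - partFourBStart new_id.toList 0)
        (List.drop (partFourBStart new_id.toList 0) new_id.toList))
    = String.ofList (pvCanon new_id.toList)
  have h0 : partFourBStart new_id.toList 0 = ((new_id.toList).takeWhile pvDot).length := by
    simpa using pvBStart_eq new_id.toList 0
  have hle : ((new_id.toList).takeWhile pvDot).length ≤ new_id.toList.length :=
    (List.takeWhile_sublist _).length_le
  have hdrop : ∀ l : List Char, l.drop ((l).takeWhile pvDot).length = l.dropWhile pvDot := by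
    intro l
    induction l with
    | nil => simp
    | cons c t iht =>
      by_cases hc : pvDot c
      · simp [List.dropWhile_cons, hc, iht]
      · simp [List.takeWhile_cons, List.dropWhile_cons, hc]
  rw [h0, pvBEnd_eq _ _ _ hle (le_refl _)]
  rw [List.take_of_length_le (by simp)]
  rw [hdrop new_id.toList, pvCanon]


-- ===== VERDICT (by name: the statement is the Claim_ definition above) =====
theorem partFour_spec : Claim_equal_partFour := by
  intro new_id _ _
  unfold Spec_partFour
  rw [partFour_alt_eq_canon, partFour]
  by_cases h : new_id = ""
  · subst h
    simp [pvCanon]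
  · rw [if_neg (by simpa using h)]
    rw [partFourLoopA_eq_canon]
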